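-- pv_equiv track=rewrite | github.com/biagiolicari/Full-Text-Search-for-DBLP | query/getqueries.py | unitequoted
-- ===== SOURCE A (Python) =====
-- def unitequoted(queries):
--     newqueries = []
--     quoted = False
--     for q in queries:
--         if quoted:
--             dim = len(newqueries)-1
--             newqueries[dim] = newqueries[dim] + " " + q
--             if q.endswith('"'):
--                 quoted = False
--             continue
--
--         if q.startswith('"'):
--             newqueries.append(q)
--             if not q.endswith('"'):
--                 quoted = True
--             continue
--         newqueries.append(q)
--     return newqueries
-- ===== SOURCE B (Python) =====
-- def unitequoted(queries):
--     out = []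
--     i = 0
--     n = len(queries)
--     while i < n:
--         q = queries[i]
--         i += 1
--         if q.startswith('"') and not q.endswith('"'):
--             phrase = q
--             while i < n:
--                 t = queries[i]
--                 i += 1
--                 phrase = phrase + " " + t
--                 if t.endswith('"'):
--                     break
--             out.append(phrase)
--         else:
--             out.append(q)
--     return out
-- ===== Notes on version B (the rewrite author's own statement) =====
-- stated objective: alternative
-- what changed: Replaces A's single flat pass with a quoted/unquoted flag that mutates the last emitted element, by a nested index loop that, on seeing an opening quote, consumes the whole quoted run in an inner loop building the phrase and emits it once.
import Mathlib
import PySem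

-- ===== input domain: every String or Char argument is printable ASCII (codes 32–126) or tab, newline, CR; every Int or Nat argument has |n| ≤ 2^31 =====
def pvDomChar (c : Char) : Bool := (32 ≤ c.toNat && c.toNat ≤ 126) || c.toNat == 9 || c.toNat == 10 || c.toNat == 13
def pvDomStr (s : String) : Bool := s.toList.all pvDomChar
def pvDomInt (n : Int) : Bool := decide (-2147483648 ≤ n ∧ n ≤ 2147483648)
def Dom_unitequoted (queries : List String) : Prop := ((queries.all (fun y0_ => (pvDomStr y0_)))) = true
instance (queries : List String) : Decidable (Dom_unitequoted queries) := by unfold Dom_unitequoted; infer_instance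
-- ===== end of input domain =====

-- B replaces A's flat flag-and-mutate-last pass by a nested consume-a-run loop; same cost, different decomposition.


-- ===== PORT A =====
-- one loop iteration: state = (newqueries, quoted); the dim = len-1 index is taken on a
-- nonempty list whenever quoted is set (Python would raise only on an unreachable empty list;
-- getD/set are the totality default there)
def unitequotedStep (st : List String × Bool) (q : String) : List String × Bool :=
  if st.2 then
    let dim := st.1.length - 1
    let ns := st.1.set dim (st.1.getD dim "" ++ " " ++ q)
    (ns, if PySem.Str.endswith q "\"" then false else true)
  else if PySem.Str.startswith q "\"" then
    (st.1 ++ [q], if !PySem.Str.endswith q "\"" then true else false)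
  else
    (st.1 ++ [q], st.2)

def unitequoted (queries : List String) : List String :=
  (queries.foldl unitequotedStep ([], false)).1

-- ===== PORT B =====
-- inner while loop of B: accumulate tokens into the phrase until one ends with '"' or the
-- list is exhausted; returns the finished phrase and the unconsumed tail
def altConsume (phrase : String) (rest : List String) : String × List String :=
  match rest with
  | [] => (phrase, [])
  | t :: rs =>
    let p := phrase ++ " " ++ t
    if PySem.Str.endswith t "\"" then (p, rs) else altConsume p rs

theorem altConsume_len (phrase : String) (rest : List String) :
    (altConsume phrase rest).2.length ≤ rest.length := by
  induction rest generalizing phrase with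
  | nil => simp [altConsume]
  | cons t rs ih =>
    simp only [altConsume]
    split
    · simp
    · exact le_trans (ih _) (Nat.le_succ _)

-- outer while loop of B over the remaining tokens
def unitequoted_alt_go (rest : List String) : List String :=
  match rest with
  | [] => []
  | q :: rs =>
    if PySem.Str.startswith q "\"" && !PySem.Str.endswith q "\"" then
      (altConsume q rs).1 :: unitequoted_alt_go (altConsume q rs).2
    else
      q :: unitequoted_alt_go rs
termination_by rest.length
decreasing_by
  · exact Nat.lt_succ_of_le (altConsume_len q rs)
  · simp

def unitequoted_alt (queries : List String) : List String :=
  unitequoted_alt_go queries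

-- ===== PRECONDITION & SPEC =====
def Spec_unitequoted (queries : List String) (out : List String) : Prop := out = unitequoted_alt queries
instance (queries : List String) (out : List String) : Decidable (Spec_unitequoted queries out) := by unfold Spec_unitequoted; infer_instance

-- ===== CLAIM (what is proved, stated in full; the proofs are below) =====
def Claim_equal_unitequoted : Prop := ∀ (queries : List String), Dom_unitequoted queries → Spec_unitequoted queries (unitequoted queries)

-- ===== LEMMAS AND PROOFS =====

theorem getD_append_singleton (acc : List String) (p : String) :
    (acc ++ [p]).getD acc.length "" = p := by
  simp [List.getD]

theorem set_append_singleton (acc : List String) (p x : String) :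
    (acc ++ [p]).set acc.length x = acc ++ [x] := by
  simp [List.set_append_right]

theorem step_quoted (acc : List String) (p q : String) :
    unitequotedStep (acc ++ [p], true) q
      = (acc ++ [p ++ " " ++ q], if PySem.Str.endswith q "\"" then false else true) := by
  have hlen : (acc ++ [p]).length - 1 = acc.length := by simp
  simp only [unitequotedStep, reduceIte, hlen, getD_append_singleton, set_append_singleton]

theorem step_unquoted (acc : List String) (q : String) :
    unitequotedStep (acc, false) q
      = (acc ++ [q],
         if PySem.Str.startswith q "\"" then (if !PySem.Str.endswith q "\"" then true else false)
         else false) := by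
  simp only [unitequotedStep, Bool.false_eq_true, reduceIte]
  split <;> rfl

theorem consume_run (rest : List String) :
    ∀ (acc : List String) (phrase : String),
      (rest.foldl unitequotedStep (acc ++ [phrase], true)).1
        = ((altConsume phrase rest).2.foldl unitequotedStep
            (acc ++ [(altConsume phrase rest).1], false)).1 := by
  induction rest with
  | nil => intro acc phrase; simp [altConsume]
  | cons t rs ih =>
    intro acc phrase
    rw [List.foldl_cons, step_quoted]
    cases h : PySem.Str.endswith t "\"" with
    | true => rw [if_pos rfl]; simp only [altConsume, h, if_true]
    | false =>
      rw [if_neg (by simp)]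
      simp only [altConsume, h, Bool.false_eq_true, if_false]
      exact ih acc (phrase ++ " " ++ t)

theorem main_loop (rest : List String) :
    ∀ (acc : List String),
      (rest.foldl unitequotedStep (acc, false)).1 = acc ++ unitequoted_alt_go rest := by
  induction rest using unitequoted_alt_go.induct with
  | case1 => intro acc; simp [unitequoted_alt_go]
  | case2 q rs hq ih =>
    intro acc
    obtain ⟨hs, he⟩ : PySem.Str.startswith q "\"" = true ∧ PySem.Str.endswith q "\"" = false := by
      revert hq; cases h1 : PySem.Str.startswith q "\"" <;>
        cases h2 : PySem.Str.endswith q "\"" <;> simp [h1, h2]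
    rw [List.foldl_cons, step_unquoted, hs, he, if_pos rfl]
    rw [if_pos (by simp), consume_run rs acc q, ih]
    rw [unitequoted_alt_go]
    rw [if_pos (by rw [hs, he]; rfl)]
    simp
  | case3 q rs hq ih =>
    intro acc
    rw [List.foldl_cons, step_unquoted]
    have hflag : (if PySem.Str.startswith q "\"" then
        (if !PySem.Str.endswith q "\"" then true else false) else false) = false := by
      cases h1 : PySem.Str.startswith q "\"" <;> cases h2 : PySem.Str.endswith q "\"" <;>
        simp_all
    rw [hflag, ih, unitequoted_alt_go]
    rw [if_neg (by simpa using hq)]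
    simp

-- ===== VERDICT (by name: the statement is the Claim_ definition above) =====
theorem unitequoted_spec : Claim_equal_unitequoted := by
  intro queries _
  unfold Spec_unitequoted unitequoted unitequoted_alt
  simpa using main_loop queries []
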